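-- pv_equiv track=rewrite | github.com/Duncan-W/hcai_paper | generate_taxonomy_direct.py | determine_proficiency_levels
-- ===== SOURCE A (Python) =====
-- from typing import Dict, List
--
-- def determine_proficiency_levels(blooms_levels: set) -> List[str]:
--     """Determine proficiency levels based on Bloom's taxonomy"""
--     blooms_hierarchy = {
--         'Remember': 1,
--         'Understand': 2,
--         'Apply': 3,
--         'Analyze': 4,
--         'Evaluate': 5,
--         'Create': 6
--     }
--
--     max_level = max(blooms_hierarchy.get(b, 3) for b in blooms_levels)
--
--     if max_level <= 2:
--         return ['Beginner']
--     elif max_level <= 4: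
--         return ['Beginner', 'Intermediate']
--     else:
--         return ['Beginner', 'Intermediate', 'Advanced']
-- ===== SOURCE B (Python) =====
-- from typing import List
--
-- def determine_proficiency_levels(blooms_levels: set) -> List[str]:
--     """Determine proficiency levels based on Bloom's taxonomy"""
--     levels = ['Beginner']
--     if any(b not in ('Remember', 'Understand') for b in blooms_levels):
--         levels.append('Intermediate')
--     if any(b in ('Evaluate', 'Create') for b in blooms_levels):
--         levels.append('Advanced')
--     return levels
-- ===== Notes on version B (the rewrite author's own statement) =====
-- stated objective: simpler
-- what changed: Drops the numeric Bloom hierarchy and the max-over-comprehension entirely: B builds the result incrementally from two boolean membership tests (any level beyond Remember/Understand unlocks Intermediate, any Evaluate/Create unlocks Advanced).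
import Mathlib
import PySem

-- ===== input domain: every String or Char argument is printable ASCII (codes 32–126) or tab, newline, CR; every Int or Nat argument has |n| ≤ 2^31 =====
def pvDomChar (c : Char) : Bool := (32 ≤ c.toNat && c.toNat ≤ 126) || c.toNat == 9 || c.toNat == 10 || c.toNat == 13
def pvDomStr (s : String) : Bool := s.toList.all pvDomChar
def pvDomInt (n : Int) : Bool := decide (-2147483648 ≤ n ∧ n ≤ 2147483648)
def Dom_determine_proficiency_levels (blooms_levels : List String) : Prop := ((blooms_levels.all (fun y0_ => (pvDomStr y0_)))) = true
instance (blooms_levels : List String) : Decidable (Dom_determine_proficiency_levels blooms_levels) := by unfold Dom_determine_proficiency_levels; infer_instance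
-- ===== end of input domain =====

-- B drops the numeric hierarchy and the max over a comprehension: it builds the result
-- incrementally from two boolean membership tests (objective: simpler).

-- ===== PORT A =====
def pvBloomsHierarchy : PySem.Dict String Int :=
  (((((PySem.Dict.empty.insert "Remember" 1).insert "Understand" 2).insert "Apply" 3).insert
      "Analyze" 4).insert "Evaluate" 5).insert "Create" 6

-- max(gen) over a nonempty sequence; [] is excluded by Pre_ (ValueError), value there irrelevant
def determine_proficiency_levels (blooms_levels : List String) : List String :=
  match blooms_levels.map (fun b => pvBloomsHierarchy.getD b 3) with
  | [] => []
  | h :: t =>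
    let max_level := t.foldl max h
    if max_level ≤ 2 then ["Beginner"]
    else if max_level ≤ 4 then ["Beginner", "Intermediate"]
    else ["Beginner", "Intermediate", "Advanced"]

-- ===== PORT B =====
def determine_proficiency_levels_alt (blooms_levels : List String) : List String :=
  let levels := ["Beginner"]
  let levels := if blooms_levels.any (fun b => !(b == "Remember" || b == "Understand"))
                then levels ++ ["Intermediate"] else levels
  let levels := if blooms_levels.any (fun b => b == "Evaluate" || b == "Create")
                then levels ++ ["Advanced"] else levels
  levels

-- ===== PRECONDITION & SPEC =====
-- Pre_ excludes only the empty list, where Python's max() raises ValueError in A.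
def Pre_determine_proficiency_levels (blooms_levels : List String) : Prop := blooms_levels ≠ []
instance (blooms_levels : List String) : Decidable (Pre_determine_proficiency_levels blooms_levels) := by unfold Pre_determine_proficiency_levels; infer_instance
def pvWitness_determine_proficiency_levels : List String := ["Apply", "Create"]
def Spec_determine_proficiency_levels (blooms_levels : List String) (out : List String) : Prop := out = determine_proficiency_levels_alt blooms_levels
instance (blooms_levels : List String) (out : List String) : Decidable (Spec_determine_proficiency_levels blooms_levels out) := by unfold Spec_determine_proficiency_levels; infer_instance

-- ===== CLAIM =====
def Claim_equal_determine_proficiency_levels : Prop := ∀ (blooms_levels : List String), Dom_determine_proficiency_levels blooms_levels → Pre_determine_proficiency_levels blooms_levels → Spec_determine_proficiency_levels blooms_levels (determine_proficiency_levels blooms_levels)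

-- ===== LEMMAS AND PROOFS =====

def pvLvl (b : String) : Int := pvBloomsHierarchy.getD b 3

theorem foldl_max_le (t : List String) (a k : Int) :
    (t.foldl (fun acc b => max acc (pvLvl b)) a ≤ k) ↔ (a ≤ k ∧ ∀ b ∈ t, pvLvl b ≤ k) := by
  induction t generalizing a with
  | nil => simp
  | cons x xs ih =>
    simp only [List.foldl_cons, ih, max_le_iff, List.mem_cons]
    constructor
    · rintro ⟨⟨h1, h2⟩, h3⟩
      refine ⟨h1, fun b hb => ?_⟩
      rcases hb with h | hb
      · exact h ▸ h2
      · exact h3 b hb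
    · rintro ⟨h1, h2⟩
      exact ⟨⟨h1, h2 x (Or.inl rfl)⟩, fun b hb => h2 b (Or.inr hb)⟩

theorem lvl_le_two (b : String) :
    (pvLvl b ≤ 2) ↔ ((b == "Remember" || b == "Understand") = true) := by
  unfold pvLvl pvBloomsHierarchy
  simp only [PySem.Dict.getD_insert, PySem.Dict.getD_empty]
  split_ifs <;> simp_all

theorem lvl_le_four (b : String) :
    (pvLvl b ≤ 4) ↔ ((b == "Evaluate" || b == "Create") = false) := by
  unfold pvLvl pvBloomsHierarchy
  simp only [PySem.Dict.getD_insert, PySem.Dict.getD_empty]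
  split_ifs <;> simp_all

theorem any_false_iff {a : Type} (p : a → Bool) (l : List a) :
    l.any p = false ↔ ∀ x ∈ l, p x = false := by
  simp [List.any_eq_false]

theorem any_low (b : String) (t : List String) :
    (((b :: t).any (fun x => !(x == "Remember" || x == "Understand"))) = false) ↔
      t.foldl (fun acc x => max acc (pvLvl x)) (pvLvl b) ≤ 2 := by
  rw [any_false_iff, foldl_max_le]
  constructor
  · intro h
    refine ⟨(lvl_le_two b).2 ?_, fun x hx => (lvl_le_two x).2 ?_⟩
    · have := h b (List.mem_cons_self ..); simp at this ⊢; tauto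
    · have := h x (List.mem_cons_of_mem _ hx); simp at this ⊢; tauto
  · rintro ⟨h1, h2⟩ x hx
    rcases List.mem_cons.1 hx with h | hx
    · subst h; have := (lvl_le_two x).1 h1; simp at this ⊢; tauto
    · have := (lvl_le_two x).1 (h2 x hx); simp at this ⊢; tauto

theorem any_high (b : String) (t : List String) :
    (((b :: t).any (fun x => x == "Evaluate" || x == "Create")) = false) ↔
      t.foldl (fun acc x => max acc (pvLvl x)) (pvLvl b) ≤ 4 := by
  rw [any_false_iff, foldl_max_le]
  constructor
  · intro h
    exact ⟨(lvl_le_four b).2 (h b (List.mem_cons_self ..)),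
      fun x hx => (lvl_le_four x).2 (h x (List.mem_cons_of_mem _ hx))⟩
  · rintro ⟨h1, h2⟩ x hx
    rcases List.mem_cons.1 hx with h | hx
    · subst h; exact (lvl_le_four x).1 h1
    · exact (lvl_le_four x).1 (h2 x hx)

theorem any_to_true {l : List String} {p : String → Bool} (h : ¬ l.any p = false) :
    l.any p = true := by
  rcases Bool.eq_false_or_eq_true (l.any p) with ht | hf
  · exact ht
  · exact absurd hf h

-- ===== VERDICT =====
theorem determine_proficiency_levels_spec : Claim_equal_determine_proficiency_levels := by
  intro bl _ hpre
  unfold Spec_determine_proficiency_levels determine_proficiency_levels determine_proficiency_levels_alt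
  cases bl with
  | nil => exact absurd rfl hpre
  | cons b t =>
    simp only [List.map_cons, List.foldl_map]
    have hfun : (fun (x : Int) (y : String) => max x (pvBloomsHierarchy.getD y 3))
        = (fun acc x => max acc (pvLvl x)) := rfl
    have hget : pvBloomsHierarchy.getD b 3 = pvLvl b := rfl
    rw [hfun, hget]
    by_cases h2 : t.foldl (fun acc x => max acc (pvLvl x)) (pvLvl b) ≤ 2
    · have h4 : t.foldl (fun acc x => max acc (pvLvl x)) (pvLvl b) ≤ 4 := by omega
      rw [if_pos h2, (any_low b t).mpr h2, (any_high b t).mpr h4]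
      simp
    · by_cases h4 : t.foldl (fun acc x => max acc (pvLvl x)) (pvLvl b) ≤ 4
      · have a1 : ((b :: t).any (fun x => !(x == "Remember" || x == "Understand"))) = true :=
          any_to_true (fun hf => h2 ((any_low b t).mp hf))
        rw [if_neg h2, if_pos h4, a1, (any_high b t).mpr h4]
        simp
      · have a2 : ((b :: t).any (fun x => x == "Evaluate" || x == "Create")) = true :=
          any_to_true (fun hf => h4 ((any_high b t).mp hf))
        have a1 : ((b :: t).any (fun x => !(x == "Remember" || x == "Understand"))) = true :=
          any_to_true (fun hf => h4 (le_trans ((any_low b t).mp hf) (by omega)))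
        rw [if_neg h2, if_neg h4, a1, a2]
        simp
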